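-- pv_equiv track=rewrite | github.com/aws/s2n-quic | .github/interop/update_required.py | format_pr_description
-- ===== SOURCE A (Python) =====
-- from collections import defaultdict
--
-- def format_pr_description(
--     additions: list[tuple[str, str, str]],
--     n_commits: int,
-- ) -> str:
--     """Generate a PR description from the list of additions."""
--     if not additions:
--         return ""
--
--     by_test: dict[str, list[tuple[str, str]]] = defaultdict(list)
--     for test, impl, role in additions:
--         by_test[test].append((impl, role))
--
--     lines = [
--         "### Description of changes:",
--         "",
--         f"This PR updates the interop required checks based on the last "
--         f"{n_commits} interop reports. All additions have a 100% pass rate "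
--         f"across all analyzed reports.",
--         "",
--         "### New required checks:",
--         "",
--     ]
--
--     for test in sorted(by_test.keys()):
--         entries = sorted(by_test[test])
--         lines.append(f"**{test}**:")
--         for impl, role in entries:
--             lines.append(f"- {impl} ({role})")
--         lines.append("")
--
--     lines.extend([
--         "### Testing:",
--         "",
--         f"All entries added have passed 100% of the interop runs in the "
--         f"last {n_commits} reports on main. No existing entries were removed.",
--     ])
--
--     return "\n".join(lines)
-- ===== SOURCE B (Python) =====
-- def format_pr_description(
--     additions: list[tuple[str, str, str]],
--     n_commits: int,
-- ) -> str:
--     """Generate a PR description from the list of additions."""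
--     if not additions:
--         return ""
--
--     # one global ordering instead of a defaultdict of per-test groups:
--     # stable-sort by (impl, role), then by test => full (test, impl, role) order
--     ordered = sorted(sorted(additions, key=lambda x: (x[1], x[2])), key=lambda x: x[0])
--
--     lines = [
--         "### Description of changes:",
--         "",
--         f"This PR updates the interop required checks based on the last "
--         f"{n_commits} interop reports. All additions have a 100% pass rate "
--         f"across all analyzed reports.",
--         "",
--         "### New required checks:",
--         "",
--     ]
--
--     current = None
--     for test, impl, role in ordered:
--         if test != current:
--             if current is not None:
--                 lines.append("")
--             lines.append(f"**{test}**:")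
--             current = test
--         lines.append(f"- {impl} ({role})")
--     lines.append("")
--
--     lines.extend([
--         "### Testing:",
--         "",
--         f"All entries added have passed 100% of the interop runs in the "
--         f"last {n_commits} reports on main. No existing entries were removed.",
--     ])
--
--     return "\n".join(lines)
-- ===== Notes on version B (the rewrite author's own statement) =====
-- stated objective: alternative
-- what changed: Replaces the defaultdict grouping plus per-group sorts by one global stable sort of the whole additions list and a single pass that emits a group header whenever the test key changes.
import Mathlib
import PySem

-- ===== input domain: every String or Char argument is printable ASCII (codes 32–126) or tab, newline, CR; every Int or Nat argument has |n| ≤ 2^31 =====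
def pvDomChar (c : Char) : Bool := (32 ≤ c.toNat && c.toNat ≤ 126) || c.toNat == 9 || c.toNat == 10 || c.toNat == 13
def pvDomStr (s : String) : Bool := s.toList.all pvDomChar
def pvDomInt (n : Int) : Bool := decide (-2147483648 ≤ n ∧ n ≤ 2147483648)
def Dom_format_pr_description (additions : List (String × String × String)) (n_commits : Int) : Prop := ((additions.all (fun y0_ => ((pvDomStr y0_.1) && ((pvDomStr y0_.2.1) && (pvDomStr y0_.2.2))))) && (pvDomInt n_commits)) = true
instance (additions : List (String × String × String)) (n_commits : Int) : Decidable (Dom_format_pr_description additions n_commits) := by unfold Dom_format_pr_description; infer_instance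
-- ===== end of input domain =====

-- B replaces A's defaultdict grouping + per-group sorts by one global stable sort and a single
-- key-change pass; same return value (alternative decomposition, no speed claim).

-- ===== PORT A =====
def format_pr_description (additions : List (String × String × String)) (n_commits : Int) : String :=
  if additions = [] then "" else
  let by_test : PySem.Dict String (List (String × String)) :=
    additions.foldl (fun d p => d.modify p.1 [] (fun x => x ++ [p.2])) PySem.Dict.empty
  let lines : List String :=
    ["### Description of changes:",
     "",
     "This PR updates the interop required checks based on the last " ++ PySem.Int.toStr n_commits ++ " interop reports. All additions have a 100% pass rate across all analyzed reports.",
     "",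
     "### New required checks:",
     ""]
  let lines := (PySem.List.sorted by_test.keys (fun k => k)).foldl
    (fun lines test =>
      let entries := PySem.List.sorted2 (by_test.getD test []) (fun e => e.1) (fun e => e.2)
      let lines := lines ++ ["**" ++ test ++ "**:"]
      let lines := entries.foldl (fun lines e => lines ++ ["- " ++ e.1 ++ " (" ++ e.2 ++ ")"]) lines
      lines ++ [""])
    lines
  let lines := lines ++
    ["### Testing:",
     "",
     "All entries added have passed 100% of the interop runs in the last " ++ PySem.Int.toStr n_commits ++ " reports on main. No existing entries were removed."]
  PySem.Str.join "\n" lines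

-- ===== PORT B =====
-- the body of Source B's single pass ('if test != current: …; lines.append(entry line)')
def pvStepB (s : List String × Option String) (x : String × String × String) : List String × Option String :=
  let s := if some x.1 ≠ s.2 then
      ((if s.2 ≠ none then s.1 ++ [""] else s.1) ++ ["**" ++ x.1 ++ "**:"], some x.1)
    else s
  (s.1 ++ ["- " ++ x.2.1 ++ " (" ++ x.2.2 ++ ")"], s.2)

def format_pr_description_alt (additions : List (String × String × String)) (n_commits : Int) : String :=
  if additions = [] then "" else
  let ordered := PySem.List.sorted
    (PySem.List.sorted2 additions (fun x => x.2.1) (fun x => x.2.2)) (fun x => x.1)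
  let lines : List String :=
    ["### Description of changes:",
     "",
     "This PR updates the interop required checks based on the last " ++ PySem.Int.toStr n_commits ++ " interop reports. All additions have a 100% pass rate across all analyzed reports.",
     "",
     "### New required checks:",
     ""]
  let r := ordered.foldl pvStepB (lines, none)
  let lines := r.1 ++ [""]
  let lines := lines ++
    ["### Testing:",
     "",
     "All entries added have passed 100% of the interop runs in the last " ++ PySem.Int.toStr n_commits ++ " reports on main. No existing entries were removed."]
  PySem.Str.join "\n" lines

-- ===== PRECONDITION & SPEC =====
def Spec_format_pr_description (additions : List (String × String × String)) (n_commits : Int) (out : String) : Prop := out = format_pr_description_alt additions n_commits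
instance (additions : List (String × String × String)) (n_commits : Int) (out : String) : Decidable (Spec_format_pr_description additions n_commits out) := by unfold Spec_format_pr_description; infer_instance

-- ===== CLAIM (what is proved, stated in full; the proofs are below) =====
def Claim_equal_format_pr_description : Prop := ∀ (additions : List (String × String × String)) (n_commits : Int), Dom_format_pr_description additions n_commits → Spec_format_pr_description additions n_commits (format_pr_description additions n_commits)

-- ===== LEMMAS AND PROOFS =====

theorem pvInsertBy_nil {α : Type} (before : α → α → Bool) (x : α) :
    PySem.List.insertBy before x [] = [x] := rfl
theorem pvInsertBy_cons {α : Type} (before : α → α → Bool) (x y : α) (ys : List α) :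
    PySem.List.insertBy before x (y :: ys) =
      if before x y then x :: y :: ys else y :: PySem.List.insertBy before x ys := rfl

theorem pvInsertBy_inv {α : Type} (before : α → α → Bool)
    (hA : ∀ a b, before a b = true → before b a = false)
    (hT : ∀ a b c, before a b = true → before c b = false → before a c = true)
    (x : α) (acc : List α) (h : acc.Pairwise (fun a b => before b a = false)) :
    (PySem.List.insertBy before x acc).Pairwise (fun a b => before b a = false) := by
  induction acc with
  | nil => simp [pvInsertBy_nil]
  | cons y ys ih =>
    rcases List.pairwise_cons.mp h with ⟨hy, hys⟩
    rw [pvInsertBy_cons]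
    by_cases hxy : before x y = true
    · rw [if_pos hxy]
      refine List.pairwise_cons.mpr ⟨?_, h⟩
      intro b hb
      rcases List.mem_cons.mp hb with rfl | hb
      · exact hA _ _ hxy
      · exact hA _ _ (hT x y b hxy (hy b hb))
    · rw [if_neg hxy]
      refine List.pairwise_cons.mpr ⟨?_, ih hys⟩
      intro b hb
      rcases (PySem.List.mem_insertBy before x b ys).mp hb with rfl | hb
      · simpa using hxy
      · exact hy b hb

theorem pvInsertBy_filter {α : Type} (before : α → α → Bool)
    (hA : ∀ a b, before a b = true → before b a = false)
    (hT : ∀ a b c, before a b = true → before c b = false → before a c = true)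
    (p : α → Bool) (x : α) (acc : List α) (h : acc.Pairwise (fun a b => before b a = false)) :
    (PySem.List.insertBy before x acc).filter p =
      if p x then PySem.List.insertBy before x (acc.filter p) else acc.filter p := by
  induction acc with
  | nil =>
    rw [pvInsertBy_nil]
    by_cases hp : p x = true <;> simp [hp, pvInsertBy_nil]
  | cons y ys ih =>
    rcases List.pairwise_cons.mp h with ⟨hy, hys⟩
    rw [pvInsertBy_cons]
    by_cases hxy : before x y = true
    · rw [if_pos hxy]
      by_cases hpx : p x = true
      · by_cases hpy : p y = true
        · simp [List.filter_cons, hpx, hpy, pvInsertBy_cons, hxy]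
        · have hfront : PySem.List.insertBy before x (ys.filter p) = x :: ys.filter p := by
            cases hf : ys.filter p with
            | nil => rw [pvInsertBy_nil]
            | cons z zs =>
              have hz : z ∈ ys := List.mem_of_mem_filter (hf ▸ List.mem_cons_self)
              rw [pvInsertBy_cons, if_pos (hT x y z hxy (hy z hz))]
          simp [List.filter_cons, hpx, hpy, hfront]
      · simp [List.filter_cons, hpx]
    · rw [if_neg hxy]
      by_cases hpx : p x = true
      · by_cases hpy : p y = true
        · simp [List.filter_cons, hpy, ih hys, hpx, pvInsertBy_cons, hxy]
        · simp [List.filter_cons, hpy, ih hys, hpx]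
      · by_cases hpy : p y = true
        · simp [List.filter_cons, hpy, ih hys, hpx]
        · simp [List.filter_cons, hpy, ih hys, hpx]

theorem pvCmp1_asymm {α κ : Type} [LinearOrder κ] (k : α → κ) (a b : α)
    (h : decide (k a < k b) = true) : decide (k b < k a) = false := by
  simp_all; exact le_of_lt h
theorem pvCmp1_trans {α κ : Type} [LinearOrder κ] (k : α → κ) (a b c : α)
    (h1 : decide (k a < k b) = true) (h2 : decide (k c < k b) = false) :
    decide (k a < k c) = true := by
  simp_all; exact lt_of_lt_of_le h1 h2

theorem pvFoldIns_filter {α : Type} (before : α → α → Bool)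
    (hA : ∀ a b, before a b = true → before b a = false)
    (hT : ∀ a b c, before a b = true → before c b = false → before a c = true)
    (p : α → Bool) (l acc : List α) (h : acc.Pairwise (fun a b => before b a = false)) :
    (l.foldl (fun acc x => PySem.List.insertBy before x acc) acc).filter p =
      (l.filter p).foldl (fun acc x => PySem.List.insertBy before x acc) (acc.filter p) := by
  induction l generalizing acc with
  | nil => simp
  | cons x l ih =>
    rw [List.foldl_cons, ih _ (pvInsertBy_inv before hA hT x acc h),
        pvInsertBy_filter before hA hT p x acc h, List.filter_cons]
    by_cases hpx : p x = true <;> simp [hpx]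

theorem pvFoldIns_id {α : Type} (before : α → α → Bool)
    (l acc : List α)
    (h1 : ∀ a ∈ l, ∀ b ∈ acc, before a b = false)
    (h2 : ∀ a ∈ l, ∀ b ∈ l, before a b = false) :
    l.foldl (fun acc x => PySem.List.insertBy before x acc) acc = acc ++ l := by
  induction l generalizing acc with
  | nil => simp
  | cons x l ih =>
    rw [List.foldl_cons,
        PySem.List.insertBy_of_forall_not_before before x acc
          (fun b hb => h1 x List.mem_cons_self b hb)]
    rw [ih (acc ++ [x])]
    · simp
    · intro a ha b hb
      rcases List.mem_append.mp hb with hb | hb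
      · exact h1 a (List.mem_cons_of_mem _ ha) b hb
      · rcases List.mem_singleton.mp hb with rfl
        exact h2 a (List.mem_cons_of_mem _ ha) b List.mem_cons_self
    · intro a ha b hb
      exact h2 a (List.mem_cons_of_mem _ ha) b (List.mem_cons_of_mem _ hb)

theorem pvInsertBy_map {α β : Type} (before : α → α → Bool) (before' : β → β → Bool)
    (f : α → β) (hf : ∀ a b, before' (f a) (f b) = before a b)
    (x : α) (acc : List α) :
    (PySem.List.insertBy before x acc).map f =
      PySem.List.insertBy before' (f x) (acc.map f) := by
  induction acc with
  | nil => simp [pvInsertBy_nil]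
  | cons y ys ih =>
    rw [pvInsertBy_cons, List.map_cons, pvInsertBy_cons, hf]
    by_cases hxy : before x y = true <;> simp [hxy, ih]

theorem pvFoldIns_map {α β : Type} (before : α → α → Bool) (before' : β → β → Bool)
    (f : α → β) (hf : ∀ a b, before' (f a) (f b) = before a b)
    (l acc : List α) :
    (l.foldl (fun acc x => PySem.List.insertBy before x acc) acc).map f =
      (l.map f).foldl (fun acc y => PySem.List.insertBy before' y acc) (acc.map f) := by
  induction l generalizing acc with
  | nil => simp
  | cons x l ih =>
    rw [List.foldl_cons, ih, List.map_cons, List.foldl_cons,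
        pvInsertBy_map before before' f hf]

theorem pvCmp2_asymm {α κ₁ κ₂ : Type} [LinearOrder κ₁] [LinearOrder κ₂]
    (k1 : α → κ₁) (k2 : α → κ₂) (a b : α)
    (h : (decide (k1 a < k1 b) || (!decide (k1 b < k1 a) && decide (k2 a < k2 b))) = true) :
    (decide (k1 b < k1 a) || (!decide (k1 a < k1 b) && decide (k2 b < k2 a))) = false := by
  simp only [Bool.or_eq_true, Bool.and_eq_true, Bool.not_eq_true', decide_eq_true_eq,
    decide_eq_false_iff_not] at h
  apply Bool.eq_false_iff.mpr
  intro hc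
  simp only [Bool.or_eq_true, Bool.and_eq_true, Bool.not_eq_true', decide_eq_true_eq,
    decide_eq_false_iff_not] at hc
  rcases h with h | ⟨h1, h2⟩ <;> rcases hc with hc | ⟨hc1, hc2⟩
  · exact absurd hc (lt_asymm h)
  · exact absurd h hc1
  · exact absurd hc h1
  · exact absurd hc2 (lt_asymm h2)

theorem pvCmp2_trans {α κ₁ κ₂ : Type} [LinearOrder κ₁] [LinearOrder κ₂]
    (k1 : α → κ₁) (k2 : α → κ₂) (a b c : α)
    (h1 : (decide (k1 a < k1 b) || (!decide (k1 b < k1 a) && decide (k2 a < k2 b))) = true)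
    (h2 : (decide (k1 c < k1 b) || (!decide (k1 b < k1 c) && decide (k2 c < k2 b))) = false) :
    (decide (k1 a < k1 c) || (!decide (k1 c < k1 a) && decide (k2 a < k2 c))) = true := by
  simp only [Bool.or_eq_true, Bool.and_eq_true, Bool.not_eq_true', decide_eq_true_eq,
    decide_eq_false_iff_not] at h1
  simp only [Bool.or_eq_false_iff, Bool.and_eq_false_iff, Bool.not_eq_false',
    Bool.not_eq_true', decide_eq_true_eq, decide_eq_false_iff_not] at h2
  simp only [Bool.or_eq_true, Bool.and_eq_true, Bool.not_eq_true', decide_eq_true_eq,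
    decide_eq_false_iff_not]
  obtain ⟨hcb, h2'⟩ := h2
  have hbc : k1 b ≤ k1 c := le_of_not_gt hcb
  rcases h1 with h1 | ⟨hba, h2ab⟩
  · exact Or.inl (lt_of_lt_of_le h1 hbc)
  · have hab : k1 a ≤ k1 b := le_of_not_gt hba
    rcases h2' with hbc' | hcb2
    · exact Or.inl (lt_of_le_of_lt hab hbc')
    · refine Or.inr ⟨fun hca => absurd (lt_of_lt_of_le hca hab) hcb, ?_⟩
      exact lt_of_lt_of_le h2ab (le_of_not_gt hcb2)

theorem pvAdd_cons {α : Type} [BEq α] [LawfulBEq α] (s : List α) (c y : α) (h : y ≠ c) :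
    PySem.Set.add (c :: s) y = c :: PySem.Set.add s y := by
  simp only [PySem.Set.add, PySem.Set.contains, List.contains_cons]
  have hcy : (y == c) = false := by simpa using h
  rw [hcy]
  split <;> rename_i hh <;> simp at hh <;> simp [hh]

theorem pvFoldAdd_cons {α : Type} [BEq α] [LawfulBEq α] (L : List α) (c : α) (s : List α)
    (h : c ∉ L) :
    L.foldl PySem.Set.add (c :: s) = c :: L.foldl PySem.Set.add s := by
  induction L generalizing s with
  | nil => rfl
  | cons y L ih =>
    have hy : y ≠ c := fun e => h (e ▸ List.mem_cons_self)
    rw [List.foldl_cons, List.foldl_cons, pvAdd_cons s c y hy,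
        ih _ (fun hm => h (List.mem_cons_of_mem _ hm))]

theorem pvFoldAdd_const {α : Type} [BEq α] [LawfulBEq α] (L : List α) (c : α)
    (h : ∀ y ∈ L, y = c) :
    L.foldl PySem.Set.add [c] = [c] := by
  induction L with
  | nil => rfl
  | cons y L ih =>
    rw [List.foldl_cons]
    have hcc : PySem.Set.add [c] y = [c] := by
      simp [PySem.Set.add, PySem.Set.contains, h y List.mem_cons_self]
    rw [hcc]
    exact ih (fun z hz => h z (List.mem_cons_of_mem _ hz))

theorem pvOfList_group {α : Type} [BEq α] [LawfulBEq α] (L1 L2 : List α) (c : α)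
    (h1 : ∀ y ∈ L1, y = c) (hne : L1 ≠ []) (h2 : c ∉ L2) :
    PySem.Set.ofList (L1 ++ L2) = c :: PySem.Set.ofList L2 := by
  rw [PySem.Set.ofList_eq_foldl, PySem.Set.ofList_eq_foldl, List.foldl_append]
  cases L1 with
  | nil => exact absurd rfl hne
  | cons y L1' =>
    have hy : y = c := h1 y List.mem_cons_self
    have h0 : PySem.Set.add [] y = [c] := by simp [PySem.Set.add, PySem.Set.contains, hy]
    rw [List.foldl_cons, h0, pvFoldAdd_const L1' c (fun z hz => h1 z (List.mem_cons_of_mem _ hz))]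
    exact pvFoldAdd_cons L2 c [] h2

theorem pvDropWhileHead {α : Type} (p : α → Bool) (l : List α) (y : α) (ys : List α)
    (h : l.dropWhile p = y :: ys) : p y = false := by
  induction l with
  | nil => simp at h
  | cons a l ih =>
    by_cases hp : p a = true
    · rw [List.dropWhile_cons_of_pos hp] at h; exact ih h
    · rw [List.dropWhile_cons_of_neg hp] at h
      cases h
      simpa using hp

theorem pvFlatMap_congr {α β : Type} (l : List α) (f g : α → List β)
    (h : ∀ a ∈ l, f a = g a) : l.flatMap f = l.flatMap g := by
  induction l with
  | nil => rfl
  | cons a l ih =>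
    simp only [List.flatMap_cons, h a List.mem_cons_self,
      ih (fun b hb => h b (List.mem_cons_of_mem _ hb))]

theorem pvFiberDecomp {α κ : Type} [LinearOrder κ] [BEq κ] [LawfulBEq κ] (k : α → κ) :
    ∀ (n : Nat) (m : List α), m.length ≤ n → m.Pairwise (fun a b => k a ≤ k b) →
      (PySem.Set.ofList (m.map k)).Pairwise (fun a b => a < b) ∧
      m = (PySem.Set.ofList (m.map k)).flatMap (fun t => m.filter (fun x => k x == t)) := by
  intro n
  induction n with
  | zero =>
    intro m hlen _
    obtain rfl := List.length_eq_zero_iff.mp (Nat.le_zero.mp hlen)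
    constructor <;> simp [PySem.Set.ofList, PySem.Set.empty]
  | succ n ih =>
    intro m hlen hpw
    cases m with
    | nil => constructor <;> simp [PySem.Set.ofList, PySem.Set.empty]
    | cons hd tl =>
      have hPhd : (fun x => k x == k hd) hd = true := by simp
      have hsplit : List.takeWhile (fun x => k x == k hd) (hd :: tl) ++
          List.dropWhile (fun x => k x == k hd) tl = hd :: tl := by
        rw [← List.dropWhile_cons_of_pos (p := fun x => k x == k hd) (a := hd) (l := tl) hPhd]
        exact List.takeWhile_append_dropWhile
      have htl_pw : tl.Pairwise (fun a b => k a ≤ k b) := (List.pairwise_cons.mp hpw).2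
      have hhd_le : ∀ x ∈ tl, k hd ≤ k x := (List.pairwise_cons.mp hpw).1
      have hd_sub : (List.dropWhile (fun x => k x == k hd) tl).Sublist tl :=
        List.dropWhile_sublist _
      have hd_pw : (List.dropWhile (fun x => k x == k hd) tl).Pairwise
          (fun a b => k a ≤ k b) := htl_pw.sublist hd_sub
      have hgt : ∀ x ∈ List.dropWhile (fun x => k x == k hd) tl, k hd < k x := by
        cases hdc : List.dropWhile (fun x => k x == k hd) tl with
        | nil => simp
        | cons d0 d' =>
          have hPd0 : (fun x => k x == k hd) d0 = false := pvDropWhileHead _ tl d0 d' hdc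
          rw [hdc] at hd_sub hd_pw
          have hd0 : k hd < k d0 := by
            have hle : k hd ≤ k d0 := hhd_le d0 (hd_sub.subset List.mem_cons_self)
            rcases lt_or_eq_of_le hle with h | h
            · exact h
            · exfalso; simp [← h] at hPd0
          intro x hx
          rcases List.mem_cons.mp hx with rfl | hx'
          · exact hd0
          · exact lt_of_lt_of_le hd0 ((List.pairwise_cons.mp hd_pw).1 x hx')
      have ht1c : ∀ y ∈ (List.takeWhile (fun x => k x == k hd) (hd :: tl)).map k, y = k hd := by
        intro y hy
        rcases List.mem_map.mp hy with ⟨x, hx, rfl⟩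
        simpa using List.mem_takeWhile_imp hx
      have ht1ne : List.takeWhile (fun x => k x == k hd) (hd :: tl) ≠ [] := by
        rw [List.takeWhile_cons_of_pos (p := fun x => k x == k hd) (a := hd) (l := tl) hPhd]; simp
      have hcd : k hd ∉ (List.dropWhile (fun x => k x == k hd) tl).map k := by
        intro hcm
        rcases List.mem_map.mp hcm with ⟨x, hx, hkx⟩
        exact absurd (hkx ▸ hgt x hx) (lt_irrefl _)
      have hof : PySem.Set.ofList ((hd :: tl).map k) =
          k hd :: PySem.Set.ofList ((List.dropWhile (fun x => k x == k hd) tl).map k) := by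
        rw [← hsplit, List.map_append]
        refine pvOfList_group _ _ _ ht1c ?_ hcd
        simpa using ht1ne
      have hdlen : (List.dropWhile (fun x => k x == k hd) tl).length ≤ n := by
        have h2 : (List.dropWhile (fun x => k x == k hd) tl).length ≤ tl.length :=
          hd_sub.length_le
        have h3 : tl.length + 1 ≤ n + 1 := by simpa using hlen
        omega
      have ihd := ih _ hdlen hd_pw
      constructor
      · rw [hof]
        refine List.pairwise_cons.mpr ⟨?_, ihd.1⟩
        intro t htm
        rcases List.mem_map.mp ((PySem.Set.mem_ofList _ _).mp htm) with ⟨x, hx, rfl⟩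
        exact hgt x hx
      · rw [hof, List.flatMap_cons]
        have hfc : (hd :: tl).filter (fun x => k x == k hd) =
            List.takeWhile (fun x => k x == k hd) (hd :: tl) := by
          conv_lhs => rw [← hsplit]
          rw [List.filter_append]
          have e1 : (List.takeWhile (fun x => k x == k hd) (hd :: tl)).filter
              (fun x => k x == k hd) = List.takeWhile (fun x => k x == k hd) (hd :: tl) :=
            List.filter_eq_self.mpr (fun a ha => by
              have := ht1c (k a) (List.mem_map.mpr ⟨a, ha, rfl⟩)
              simp [this])
          rw [e1]
          have e2 : (List.dropWhile (fun x => k x == k hd) tl).filter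
              (fun x => k x == k hd) = [] :=
            List.filter_eq_nil_iff.mpr (fun a ha => by simp [ne_of_gt (hgt a ha)])
          rw [e2, List.append_nil]
        have hrest : (PySem.Set.ofList ((List.dropWhile (fun x => k x == k hd) tl).map k)).flatMap
            (fun t => (hd :: tl).filter (fun x => k x == t)) =
            (PySem.Set.ofList ((List.dropWhile (fun x => k x == k hd) tl).map k)).flatMap
            (fun t => (List.dropWhile (fun x => k x == k hd) tl).filter (fun x => k x == t)) := by
          apply pvFlatMap_congr
          intro t htm
          rcases List.mem_map.mp ((PySem.Set.mem_ofList _ _).mp htm) with ⟨x, hx, rfl⟩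
          have htc : k hd < k x := hgt x hx
          conv_lhs => rw [← hsplit]
          rw [List.filter_append]
          have e1 : (List.takeWhile (fun x => k x == k hd) (hd :: tl)).filter
              (fun a => k a == k x) = [] :=
            List.filter_eq_nil_iff.mpr (fun a ha => by
              have := ht1c (k a) (List.mem_map.mpr ⟨a, ha, rfl⟩)
              simp [this, ne_of_lt htc])
          rw [e1, List.nil_append]
        rw [hrest, hfc, ← ihd.2, hsplit]

theorem pvLoopGroupTail (g : List (String × String × String)) (t : String)
    (hk : ∀ x ∈ g, x.1 = t) (lines : List String) :
    g.foldl pvStepB (lines, some t) =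
      (lines ++ g.map (fun x => "- " ++ x.2.1 ++ " (" ++ x.2.2 ++ ")"), some t) := by
  induction g generalizing lines with
  | nil => simp
  | cons x g ih =>
    have hx : x.1 = t := hk x List.mem_cons_self
    rw [List.foldl_cons]
    have hstep : pvStepB (lines, some t) x =
        (lines ++ ["- " ++ x.2.1 ++ " (" ++ x.2.2 ++ ")"], some t) := by
      simp [pvStepB, hx]
    rw [hstep, ih (fun z hz => hk z (List.mem_cons_of_mem _ hz))]
    simp

theorem pvLoopGroup (g : List (String × String × String)) (t : String)
    (hk : ∀ x ∈ g, x.1 = t) (hne : g ≠ []) (lines0 : List String) (cur0 : Option String)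
    (hc : cur0 ≠ some t) :
    g.foldl pvStepB (lines0, cur0) =
      ((lines0 ++ (if cur0 = none then [] else [""]) ++ ["**" ++ t ++ "**:"]) ++
        g.map (fun x => "- " ++ x.2.1 ++ " (" ++ x.2.2 ++ ")"), some t) := by
  cases g with
  | nil => exact absurd rfl hne
  | cons x g =>
    have hx : x.1 = t := hk x List.mem_cons_self
    rw [List.foldl_cons]
    have hstep : pvStepB (lines0, cur0) x =
        ((lines0 ++ (if cur0 = none then [] else [""]) ++ ["**" ++ t ++ "**:"]) ++
          ["- " ++ x.2.1 ++ " (" ++ x.2.2 ++ ")"], some t) := by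
      have hne' : some x.1 ≠ cur0 := by rw [hx]; exact fun e => hc e.symm
      simp only [pvStepB, if_pos hne', hx]
      cases cur0 with
      | none => simp
      | some c =>
        have htc : ¬ t = c := fun e => hc (congrArg some e.symm)
        simp [htc]
    rw [hstep, pvLoopGroupTail g t (fun z hz => hk z (List.mem_cons_of_mem _ hz))]
    simp

theorem pvLoop (K : List String) (grp : String → List (String × String × String))
    (hne : ∀ t ∈ K, grp t ≠ []) (hkey : ∀ t ∈ K, ∀ x ∈ grp t, x.1 = t)
    (hnd : K.Pairwise (fun a b => a ≠ b)) (hK : K ≠ [])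
    (lines0 : List String) (cur0 : Option String) (hcur : ∀ t ∈ K, cur0 ≠ some t) :
    ((K.flatMap grp).foldl pvStepB (lines0, cur0)).1 ++ [""] =
      lines0 ++ (if cur0 = none then [] else [""]) ++
        K.flatMap (fun t => ("**" ++ t ++ "**:") ::
          ((grp t).map (fun x => "- " ++ x.2.1 ++ " (" ++ x.2.2 ++ ")") ++ [""])) := by
  induction K generalizing lines0 cur0 with
  | nil => exact absurd rfl hK
  | cons t K' ih =>
    rw [List.flatMap_cons, List.foldl_append,
      pvLoopGroup (grp t) t (hkey t List.mem_cons_self) (hne t List.mem_cons_self)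
        lines0 cur0 (hcur t List.mem_cons_self)]
    cases hK' : K' with
    | nil =>
      simp
    | cons t' K'' =>
      rw [← hK']
      have hK'ne : K' ≠ [] := by rw [hK']; simp
      rw [ih (fun u hu => hne u (List.mem_cons_of_mem _ hu))
            (fun u hu => hkey u (List.mem_cons_of_mem _ hu))
            (List.pairwise_cons.mp hnd).2 hK'ne _ (some t)
            (fun u hu e => (List.pairwise_cons.mp hnd).1 u hu (Option.some.inj e))]
      simp

theorem pvMain (additions : List (String × String × String)) (n_commits : Int) :
    format_pr_description additions n_commits = format_pr_description_alt additions n_commits := by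
  by_cases hnil : additions = []
  · simp [format_pr_description, format_pr_description_alt, hnil]
  · have hA1 : ∀ a b : String × String × String,
        (fun a b : String × String × String => decide (a.1 < b.1)) a b = true →
        (fun a b : String × String × String => decide (a.1 < b.1)) b a = false :=
      fun a b h => pvCmp1_asymm (fun x : String × String × String => x.1) a b h
    have hT1 : ∀ a b c : String × String × String,
        (fun a b : String × String × String => decide (a.1 < b.1)) a b = true →
        (fun a b : String × String × String => decide (a.1 < b.1)) c b = false →
        (fun a b : String × String × String => decide (a.1 < b.1)) a c = true :=
      fun a b c h1 h2 => pvCmp1_trans (fun x : String × String × String => x.1) a b c h1 h2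
    have hA2 : ∀ a b : String × String × String,
        (fun a b : String × String × String => decide (a.2.1 < b.2.1) || (!decide (b.2.1 < a.2.1) && decide (a.2.2 < b.2.2))) a b = true →
        (fun a b : String × String × String => decide (a.2.1 < b.2.1) || (!decide (b.2.1 < a.2.1) && decide (a.2.2 < b.2.2))) b a = false :=
      fun a b h => pvCmp2_asymm (fun x : String × String × String => x.2.1) (fun x => x.2.2) a b h
    have hT2 : ∀ a b c : String × String × String,
        (fun a b : String × String × String => decide (a.2.1 < b.2.1) || (!decide (b.2.1 < a.2.1) && decide (a.2.2 < b.2.2))) a b = true →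
        (fun a b : String × String × String => decide (a.2.1 < b.2.1) || (!decide (b.2.1 < a.2.1) && decide (a.2.2 < b.2.2))) c b = false →
        (fun a b : String × String × String => decide (a.2.1 < b.2.1) || (!decide (b.2.1 < a.2.1) && decide (a.2.2 < b.2.2))) a c = true :=
      fun a b c h1 h2 => pvCmp2_trans (fun x : String × String × String => x.2.1) (fun x => x.2.2) a b c h1 h2
    -- the two sorts, as insertion folds
    have h_ys_fold : PySem.List.sorted2 additions (fun x => x.2.1) (fun x => x.2.2) =
        additions.foldl (fun acc x => PySem.List.insertBy
          (fun a b => decide (a.2.1 < b.2.1) || (!decide (b.2.1 < a.2.1) && decide (a.2.2 < b.2.2))) x acc) [] := rfl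
    have h_ord_fold : PySem.List.sorted (PySem.List.sorted2 additions (fun x => x.2.1) (fun x => x.2.2)) (fun x => x.1) =
        (PySem.List.sorted2 additions (fun x => x.2.1) (fun x => x.2.2)).foldl
          (fun acc x => PySem.List.insertBy (fun a b => decide (a.1 < b.1)) x acc) [] :=
      PySem.List.sorted_eq_foldl_insertBy _ _
    have hpw_ord : ((PySem.List.sorted (PySem.List.sorted2 additions (fun x => x.2.1) (fun x => x.2.2)) (fun x => x.1))).Pairwise (fun a b => a.1 ≤ b.1) :=
      PySem.List.sorted_pairwise _ (fun x : String × String × String => x.1)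
    obtain ⟨hKSlt, hdecomp⟩ := pvFiberDecomp (fun x : String × String × String => x.1)
      ((PySem.List.sorted (PySem.List.sorted2 additions (fun x => x.2.1) (fun x => x.2.2)) (fun x => x.1))).length ((PySem.List.sorted (PySem.List.sorted2 additions (fun x => x.2.1) (fun x => x.2.2)) (fun x => x.1))) le_rfl hpw_ord
    have hperm : ((PySem.List.sorted (PySem.List.sorted2 additions (fun x => x.2.1) (fun x => x.2.2)) (fun x => x.1))).Perm additions :=
      (PySem.List.sorted_perm _ _ _).trans (PySem.List.sorted2_perm _ _ _ _)
    have hK4 : PySem.List.sorted (PySem.Set.ofList (additions.map (fun p => p.1))) (fun x => x) =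
        PySem.Set.ofList (((PySem.List.sorted (PySem.List.sorted2 additions (fun x => x.2.1) (fun x => x.2.2)) (fun x => x.1))).map (fun x => x.1)) := by
      apply PySem.List.sorted_eq_of_perm_of_pairwise_lt _ _ (fun x => x) _ hKSlt
      refine (List.perm_ext_iff_of_nodup (PySem.Set.nodup_ofList _) (PySem.Set.nodup_ofList _)).mpr ?_
      intro a
      rw [PySem.Set.mem_ofList, PySem.Set.mem_ofList]
      exact (hperm.map (fun x => x.1)).mem_iff
    -- each fiber of ordered is the stable (impl, role)-sort of the matching filter
    have hfiber : ∀ t : String, ((PySem.List.sorted (PySem.List.sorted2 additions (fun x => x.2.1) (fun x => x.2.2)) (fun x => x.1))).filter (fun x => x.1 == t) =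
        (additions.filter (fun x => x.1 == t)).foldl
          (fun acc x => PySem.List.insertBy
            (fun a b => decide (a.2.1 < b.2.1) || (!decide (b.2.1 < a.2.1) && decide (a.2.2 < b.2.2))) x acc) [] := by
      intro t
      rw [h_ord_fold]
      have e1 := pvFoldIns_filter _ hA1 hT1 (fun x => x.1 == t)
        (PySem.List.sorted2 additions (fun x => x.2.1) (fun x => x.2.2)) [] (by simp)
      simp only [List.filter_nil] at e1
      rw [e1]
      have e2 := pvFoldIns_id (fun a b : String × String × String => decide (a.1 < b.1))
        ((PySem.List.sorted2 additions (fun x => x.2.1) (fun x => x.2.2)).filter (fun x => x.1 == t)) []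
        (by simp)
        (by
          intro a ha b hb
          have ha' : a.1 = t := by simpa using (List.of_mem_filter ha)
          have hb' : b.1 = t := by simpa using (List.of_mem_filter hb)
          simp [ha', hb'])
      rw [e2, List.nil_append]
      have e3 := pvFoldIns_filter _ hA2 hT2 (fun x => x.1 == t) additions [] (by simp)
      rw [h_ys_fold, e3]
      simp
    -- A's entry list for key t equals the snd-projection of the fiber
    have hsnd : ∀ t : String,
        (((PySem.List.sorted (PySem.List.sorted2 additions (fun x => x.2.1) (fun x => x.2.2)) (fun x => x.1))).filter (fun x => x.1 == t)).map (fun x => x.2) =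
        PySem.List.sorted2 ((additions.filter (fun x => x.1 == t)).map (fun x => x.2))
          (fun e => e.1) (fun e => e.2) := by
      intro t
      rw [hfiber t]
      have := pvFoldIns_map
        (fun a b : String × String × String => decide (a.2.1 < b.2.1) || (!decide (b.2.1 < a.2.1) && decide (a.2.2 < b.2.2)))
        (fun a b : String × String => decide (a.1 < b.1) || (!decide (b.1 < a.1) && decide (a.2 < b.2)))
        (fun x => x.2) (fun a b => rfl)
        (additions.filter (fun x => x.1 == t)) []
      simp only [List.map_nil] at this
      rw [this]
      rfl

    -- nonemptiness and distinctness of the key list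
    have hone : (PySem.List.sorted (PySem.List.sorted2 additions (fun x => x.2.1) (fun x => x.2.2)) (fun x => x.1)) ≠ [] := by
      intro e
      rw [e] at hperm
      exact hnil (hperm.symm.eq_nil)
    have hKne : PySem.Set.ofList (((PySem.List.sorted (PySem.List.sorted2 additions (fun x => x.2.1) (fun x => x.2.2)) (fun x => x.1))).map (fun x => x.1)) ≠ [] := by
      obtain ⟨x, hx⟩ := List.exists_mem_of_ne_nil _ hone
      exact List.ne_nil_of_mem ((PySem.Set.mem_ofList _ _).mpr (List.mem_map.mpr ⟨x, hx, rfl⟩))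
    have hne_f : ∀ t ∈ PySem.Set.ofList (((PySem.List.sorted (PySem.List.sorted2 additions (fun x => x.2.1) (fun x => x.2.2)) (fun x => x.1))).map (fun x => x.1)),
        ((PySem.List.sorted (PySem.List.sorted2 additions (fun x => x.2.1) (fun x => x.2.2)) (fun x => x.1))).filter (fun x => x.1 == t) ≠ [] := by
      intro t ht
      rcases List.mem_map.mp ((PySem.Set.mem_ofList _ _).mp ht) with ⟨x, hx, rfl⟩
      intro e
      exact absurd (beq_self_eq_true x.1) (by simpa using List.filter_eq_nil_iff.mp e x hx)
    have hkey_f : ∀ t ∈ PySem.Set.ofList (((PySem.List.sorted (PySem.List.sorted2 additions (fun x => x.2.1) (fun x => x.2.2)) (fun x => x.1))).map (fun x => x.1)),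
        ∀ x ∈ ((PySem.List.sorted (PySem.List.sorted2 additions (fun x => x.2.1) (fun x => x.2.2)) (fun x => x.1))).filter (fun x => x.1 == t), x.1 = t := by
      intro t _ x hx
      simpa using List.of_mem_filter hx
    have hnd_f : (PySem.Set.ofList (((PySem.List.sorted (PySem.List.sorted2 additions (fun x => x.2.1) (fun x => x.2.2)) (fun x => x.1))).map (fun x => x.1))).Pairwise (fun a b => a ≠ b) :=
      hKSlt.imp (fun h => ne_of_lt h)
    -- keys of A's defaultdict
    have hkeys : (additions.foldl (fun d p => d.modify p.1 [] fun x => x ++ [p.2])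
        PySem.Dict.empty).keys = PySem.Set.ofList (additions.map (fun p => p.1)) := by
      have h := PySem.Dict.keys_foldl_modify_key additions (fun p : String × String × String => p.1)
        ([] : List (String × String)) (fun _ p => fun x => x ++ [p.2]) PySem.Dict.empty
      simpa [PySem.Dict.keys_empty, PySem.Set.update, PySem.Set.ofList_eq_foldl] using h
    -- B's loop over the grouped list
    have hloop := pvLoop (PySem.Set.ofList (((PySem.List.sorted (PySem.List.sorted2 additions (fun x => x.2.1) (fun x => x.2.2)) (fun x => x.1))).map (fun x => x.1)))
      (fun t => ((PySem.List.sorted (PySem.List.sorted2 additions (fun x => x.2.1) (fun x => x.2.2)) (fun x => x.1))).filter (fun x => x.1 == t)) hne_f hkey_f hnd_f hKne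
      ["### Description of changes:", "",
       "This PR updates the interop required checks based on the last " ++ PySem.Int.toStr n_commits ++ " interop reports. All additions have a 100% pass rate across all analyzed reports.",
       "", "### New required checks:", ""] none (by simp)
    -- assemble
    simp only [format_pr_description, format_pr_description_alt, if_neg hnil]
    conv_rhs => rw [hdecomp]
    rw [hloop]
    rw [hkeys, hK4]
    simp only [PySem.Dict.getD_foldl_modify_append]
    simp only [PySem.Dict.getD_empty, List.nil_append]
    simp only [PySem.List.foldl_append_singleton_eq_map]
    simp only [List.append_assoc]
    rw [PySem.List.foldl_append_eq_flatMap]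
    simp only [if_true, List.append_nil, List.nil_append, List.append_assoc]
    congr 1
    congr 1
    congr 1
    apply pvFlatMap_congr
    intro t _
    rw [← hsnd t, List.map_map]
    rfl

-- ===== VERDICT (by name: the statement is the Claim_ definition above) =====
theorem format_pr_description_spec : Claim_equal_format_pr_description := by
  intro additions n_commits _
  unfold Spec_format_pr_description
  exact pvMain additions n_commits
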